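-- pv_equiv track=rewrite | github.com/samirsarsia/TIP-102 | practice /hello.py | num_VIP_guests
-- ===== SOURCE A (Python) =====
-- def num_VIP_guests(vip_passes, guests):
--     vip_set = set()
--     counter = 0
--     for char in vip_passes:
--         vip_set.add(char)
--
--     for char in guests:
--         if char in vip_set:
--             counter += 1
--     return counter
-- ===== SOURCE B (Python) =====
-- def num_VIP_guests(vip_passes, guests):
--     counts = {}
--     for ch in guests:
--         counts[ch] = counts.get(ch, 0) + 1
--     total = 0
--     for v in set(vip_passes):
--         total += counts.get(v, 0)
--     return total
-- ===== Notes on version B (the rewrite author's own statement) =====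
-- stated objective: alternative
-- what changed: Instead of building a set of VIP chars and scanning the guests, B builds a frequency dict of the guests and sums the counts over the deduplicated VIP chars (the opposite role assignment).
import Mathlib
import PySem

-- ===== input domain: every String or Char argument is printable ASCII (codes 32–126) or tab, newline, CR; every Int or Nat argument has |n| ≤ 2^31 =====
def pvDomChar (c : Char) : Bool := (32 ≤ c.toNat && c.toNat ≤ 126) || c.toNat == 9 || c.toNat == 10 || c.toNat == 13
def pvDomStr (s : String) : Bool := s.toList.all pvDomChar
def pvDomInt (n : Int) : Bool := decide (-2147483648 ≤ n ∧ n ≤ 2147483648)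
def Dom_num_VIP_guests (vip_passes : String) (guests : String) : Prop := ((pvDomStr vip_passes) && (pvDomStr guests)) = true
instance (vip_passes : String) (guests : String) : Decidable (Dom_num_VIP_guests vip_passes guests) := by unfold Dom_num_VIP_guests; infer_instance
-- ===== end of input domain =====

-- B builds a frequency dict of the guests and sums counts over set(vip_passes) — the opposite role assignment from A (alternative decomposition, same cost).

-- ===== PORT A =====
def num_VIP_guests (vip_passes : String) (guests : String) : Int :=
  let vip_set : PySem.Set Char := vip_passes.toList.foldl PySem.Set.add PySem.Set.empty
  guests.toList.foldl (fun counter c => if vip_set.contains c then counter + 1 else counter) 0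

-- ===== PORT B =====
def num_VIP_guests_alt (vip_passes : String) (guests : String) : Int :=
  let counts : PySem.Dict Char Int :=
    guests.toList.foldl (fun d c => d.insert c (d.getD c 0 + 1)) PySem.Dict.empty
  (PySem.Set.ofList vip_passes.toList).foldl (fun total v => total + counts.getD v 0) 0

-- ===== PRECONDITION & SPEC =====
def Spec_num_VIP_guests (vip_passes : String) (guests : String) (out : Int) : Prop := out = num_VIP_guests_alt vip_passes guests
instance (vip_passes : String) (guests : String) (out : Int) : Decidable (Spec_num_VIP_guests vip_passes guests out) := by unfold Spec_num_VIP_guests; infer_instance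

-- ===== CLAIM (what is proved, stated in full; the proofs are below) =====
def Claim_equal_num_VIP_guests : Prop := ∀ (vip_passes : String) (guests : String), Dom_num_VIP_guests vip_passes guests → Spec_num_VIP_guests vip_passes guests (num_VIP_guests vip_passes guests)

-- ===== LEMMAS AND PROOFS =====

-- indicator sum over a vip-free list is 0
theorem pv_sum_indicator_zero (c : Char) (S : List Char) (hc : c ∉ S) :
    (S.map (fun v => if c = v then (1 : Int) else 0)).sum = 0 := by
  induction S with
  | nil => simp
  | cons a t ih =>
    simp only [List.mem_cons, not_or] at hc
    simp [hc.1, ih hc.2]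

-- indicator sum over a nodup list is the membership test
theorem pv_sum_indicator (c : Char) (S : List Char) (hS : S.Nodup) :
    (S.map (fun v => if c = v then (1 : Int) else 0)).sum
      = if c ∈ S then 1 else 0 := by
  induction S with
  | nil => simp
  | cons a t ih =>
    rcases List.nodup_cons.mp hS with ⟨ha, ht⟩
    by_cases h : c = a
    · subst h
      simp [pv_sum_indicator_zero c t ha]
    · simp [h, ih ht]

-- core: summing guest-counts over a nodup vip list = counting guests whose char is a vip
theorem pv_key (S : List Char) (hS : S.Nodup) (g : List Char) :
    (S.map (fun v => (g.count v : Int))).sum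
      = (g.countP S.contains : Int) := by
  induction g with
  | nil => simp
  | cons c t ih =>
    have hcount : ∀ v : Char, ((c :: t).count v : Int)
        = (t.count v : Int) + (if c = v then 1 else 0) := by
      intro v
      by_cases h : c = v
      · subst h; simp [List.count_cons_self]
      · simp [h]
    calc (S.map (fun v => ((c :: t).count v : Int))).sum
        = (S.map (fun v => (t.count v : Int) + (if c = v then 1 else 0))).sum := by
          simp only [hcount]
      _ = (S.map (fun v => (t.count v : Int))).sum
            + (S.map (fun v => if c = v then (1 : Int) else 0)).sum := by
          rw [← List.sum_map_add]
      _ = (t.countP S.contains : Int) + (if c ∈ S then 1 else 0) := by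
          rw [ih, pv_sum_indicator c S hS]
      _ = ((c :: t).countP S.contains : Int) := by
          rw [List.countP_cons]
          by_cases h : c ∈ S <;> simp [h]

-- ===== VERDICT (by name: the statement is the Claim_ definition above) =====
theorem num_VIP_guests_spec : Claim_equal_num_VIP_guests := by
  intro vip guests _
  unfold Spec_num_VIP_guests num_VIP_guests num_VIP_guests_alt
  simp only [PySem.Dict.foldl_insert_getD_add_one_eq_counter, PySem.Dict.getD_counter,
    PySem.List.foldl_if_add_one, PySem.List.foldl_add, zero_add]
  exact (pv_key (PySem.Set.ofList vip.toList) (PySem.Set.nodup_ofList _) guests.toList).symm
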